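-- pv_equiv track=rewrite | github.com/walterchangsmoothstack/cyber_cert_script | pdf_extract.py | removeUnwantedStrings
-- ===== SOURCE A (Python) =====
-- def removeUnwantedStrings(textList, unwantedStrings):
--     newTextList = []
--     for text in textList:
--         unwanted = False
--         for phrase in unwantedStrings:
--             if phrase in text:
--                 unwanted = True
--                 break
--         if not unwanted:
--             newTextList.append(text)
--     return newTextList
-- ===== SOURCE B (Python) =====
-- def removeUnwantedStrings(textList, unwantedStrings):
--     remaining = textList
--     for phrase in unwantedStrings:
--         remaining = [t for t in remaining if phrase not in t]
--     return remaining
-- ===== Notes on version B (the rewrite author's own statement) =====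
-- stated objective: alternative
-- what changed: Inverted the loop nesting: instead of testing each text against every phrase with a flag and break, B sweeps phrase by phrase, progressively filtering the surviving texts, so each eliminated text is never examined again.
import Mathlib
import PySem

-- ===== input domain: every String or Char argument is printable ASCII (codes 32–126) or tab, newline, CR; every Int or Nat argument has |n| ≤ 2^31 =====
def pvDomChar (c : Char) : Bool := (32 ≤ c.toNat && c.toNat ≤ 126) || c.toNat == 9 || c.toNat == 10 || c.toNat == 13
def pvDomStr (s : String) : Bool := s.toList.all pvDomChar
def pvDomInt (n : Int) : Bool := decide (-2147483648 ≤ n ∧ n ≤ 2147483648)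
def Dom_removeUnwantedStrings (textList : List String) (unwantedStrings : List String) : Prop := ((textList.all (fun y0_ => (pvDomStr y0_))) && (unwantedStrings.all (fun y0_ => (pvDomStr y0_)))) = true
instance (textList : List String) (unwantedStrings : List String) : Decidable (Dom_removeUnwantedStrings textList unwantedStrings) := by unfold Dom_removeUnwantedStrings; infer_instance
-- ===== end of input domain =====

-- B inverts the loop nesting: a phrase-by-phrase progressive filter of the surviving texts
-- instead of A's text-by-text scan over all phrases with a flag and break. Same cost class.
-- ===== PORT A =====
def removeUnwantedStrings (textList : List String) (unwantedStrings : List String) : List String :=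
  textList.foldl (fun newTextList text =>
    -- inner loop: 'unwanted' flag set (and loop broken) at the first phrase occurring in text
    let unwanted := unwantedStrings.any (fun phrase => PySem.Str.isIn phrase text)
    if !unwanted then newTextList ++ [text] else newTextList) []

-- ===== PORT B =====
def removeUnwantedStrings_alt (textList : List String) (unwantedStrings : List String) : List String :=
  unwantedStrings.foldl (fun remaining phrase =>
    remaining.filter (fun t => !(PySem.Str.isIn phrase t))) textList

-- ===== PRECONDITION & SPEC =====
def Spec_removeUnwantedStrings (textList : List String) (unwantedStrings : List String) (out : List String) : Prop := out = removeUnwantedStrings_alt textList unwantedStrings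
instance (textList : List String) (unwantedStrings : List String) (out : List String) : Decidable (Spec_removeUnwantedStrings textList unwantedStrings out) := by unfold Spec_removeUnwantedStrings; infer_instance

-- ===== CLAIM (what is proved, stated in full; the proofs are below) =====
def Claim_equal_removeUnwantedStrings : Prop := ∀ (textList : List String) (unwantedStrings : List String), Dom_removeUnwantedStrings textList unwantedStrings → Spec_removeUnwantedStrings textList unwantedStrings (removeUnwantedStrings textList unwantedStrings)

-- ===== LEMMAS AND PROOFS =====

-- A's accumulating loop is a filter by "no phrase occurs in the text".
theorem a_eq_filter (textList unwantedStrings : List String) :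
    removeUnwantedStrings textList unwantedStrings
      = textList.filter (fun t => !(unwantedStrings.any (fun p => PySem.Str.isIn p t))) := by
  show textList.foldl _ [] = _
  induction textList using List.reverseRecOn with
  | nil => rfl
  | append_singleton xs x ih =>
      rw [List.foldl_append, List.filter_append, ih]
      simp only [List.foldl_cons, List.foldl_nil, List.filter_cons, List.filter_nil]
      split <;> rename_i h <;> simp [h]

-- B's phrase-by-phrase filtering is the same single filter.
theorem alt_eq_filter (textList unwantedStrings : List String) :
    removeUnwantedStrings_alt textList unwantedStrings
      = textList.filter (fun t => !(unwantedStrings.any (fun p => PySem.Str.isIn p t))) := by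
  show unwantedStrings.foldl _ textList = _
  induction unwantedStrings generalizing textList with
  | nil => simp
  | cons p ps ih =>
      simp only [List.foldl_cons, ih, List.filter_filter, List.any_cons, Bool.not_or]
      congr 1
      funext t
      exact Bool.and_comm _ _

-- ===== VERDICT (by name: the statement is the Claim_ definition above) =====
theorem removeUnwantedStrings_spec : Claim_equal_removeUnwantedStrings := by
  intro textList unwantedStrings _
  show _ = _
  rw [alt_eq_filter, a_eq_filter]
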